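-- pv_equiv track=rewrite | github.com/logic-math/cut | cut/skills/fetch-assets/scripts/fetch_video.py | _parse_music_keywords
-- ===== SOURCE A (Python) =====
-- def _parse_music_keywords(keywords):
--     """Parse 'mood:X' and 'genre:X' prefixed keywords."""
--     mood, genre, plain = '', '', []
--     for kw in (keywords if isinstance(keywords, list) else [keywords]):
--         if kw.startswith('mood:'):
--             mood = kw[5:]
--         elif kw.startswith('genre:'):
--             genre = kw[6:]
--         else:
--             plain.append(kw)
--     return mood, genre, plain
-- ===== SOURCE B (Python) =====
-- def _parse_music_keywords(keywords):
--     """Parse 'mood:X' and 'genre:X' prefixed keywords (three-pass decomposition)."""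
--     items = keywords if isinstance(keywords, list) else [keywords]
--     moods = [kw[5:] for kw in items if kw.startswith('mood:')]
--     genres = [kw[6:] for kw in items if kw.startswith('genre:')]
--     plain = [kw for kw in items if not kw.startswith(('mood:', 'genre:'))]
--     return (moods[-1] if moods else ''), (genres[-1] if genres else ''), plain
-- ===== Notes on version B (the rewrite author's own statement) =====
-- stated objective: alternative
-- what changed: Replaces the single interleaved loop carrying (mood, genre, plain) state with three independent filtering passes: lists of mood/genre suffixes whose last element (or '') gives the result, plus one plain filter.
import Mathlib
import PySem

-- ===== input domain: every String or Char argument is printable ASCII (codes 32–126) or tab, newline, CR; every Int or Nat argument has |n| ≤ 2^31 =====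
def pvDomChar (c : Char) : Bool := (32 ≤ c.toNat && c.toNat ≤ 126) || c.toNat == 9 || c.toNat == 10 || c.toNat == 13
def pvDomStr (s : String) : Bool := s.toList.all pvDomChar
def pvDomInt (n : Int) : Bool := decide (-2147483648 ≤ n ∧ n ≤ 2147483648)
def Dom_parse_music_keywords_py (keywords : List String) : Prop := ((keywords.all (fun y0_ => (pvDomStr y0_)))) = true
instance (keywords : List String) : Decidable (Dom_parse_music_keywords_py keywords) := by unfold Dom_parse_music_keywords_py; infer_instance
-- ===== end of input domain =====

-- B replaces A's single interleaved loop (mood/genre/plain state) with three independent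
-- filtering passes whose mood/genre results are the last element of a suffix list; alternative
-- decomposition, same O(n) cost. (keywords : List String, so A's isinstance branch is the list one.)

-- ===== PORT A =====
-- one fold over the keywords carrying the (mood, genre, plain) state, branches in A's order
def parse_music_keywords_py (keywords : List String) : String × String × List String :=
  keywords.foldl
    (fun (st : String × String × List String) kw =>
      if PySem.Str.startswith kw "mood:" then (PySem.Str.slice kw (some 5) none, st.2.1, st.2.2)
      else if PySem.Str.startswith kw "genre:" then (st.1, PySem.Str.slice kw (some 6) none, st.2.2)
      else (st.1, st.2.1, st.2.2 ++ [kw]))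
    ("", "", [])

-- ===== PORT B =====
-- three separate passes; moods[-1] if moods else '' is getLast? + default
def parse_music_keywords_py_alt (keywords : List String) : String × String × List String :=
  let moods := (keywords.filter (fun kw => PySem.Str.startswith kw "mood:")).map
      (fun kw => PySem.Str.slice kw (some 5) none)
  let genres := (keywords.filter (fun kw => PySem.Str.startswith kw "genre:")).map
      (fun kw => PySem.Str.slice kw (some 6) none)
  let plain := keywords.filter
      (fun kw => !(PySem.Str.startswith kw "mood:" || PySem.Str.startswith kw "genre:"))
  (moods.getLast?.getD "", genres.getLast?.getD "", plain)

-- ===== PRECONDITION & SPEC =====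
def Spec_parse_music_keywords_py (keywords : List String) (out : String × String × List String) : Prop := out = parse_music_keywords_py_alt keywords
instance (keywords : List String) (out : String × String × List String) : Decidable (Spec_parse_music_keywords_py keywords out) := by unfold Spec_parse_music_keywords_py; infer_instance

-- ===== CLAIM (what is proved, stated in full; the proofs are below) =====
def Claim_equal_parse_music_keywords_py : Prop := ∀ (keywords : List String), Dom_parse_music_keywords_py keywords → Spec_parse_music_keywords_py keywords (parse_music_keywords_py keywords)

-- ===== LEMMAS AND PROOFS =====

theorem getLastD_cons {α : Type} (x d : α) (xs : List α) :
    ((x :: xs).getLast?).getD d = (xs.getLast?).getD x := by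
  induction xs generalizing x with
  | nil => rfl
  | cons y ys ih => rw [List.getLast?_cons_cons]; exact (ih y).trans (ih y).symm ▸ rfl

theorem not_both_prefixes (kw : String)
    (h : PySem.Str.startswith kw "mood:" = true) :
    PySem.Str.startswith kw "genre:" = false := by
  by_contra hg
  rw [Bool.not_eq_false] at hg
  rw [PySem.Str.startswith_eq, PySem.Chars.startswith_iff] at h hg
  obtain ⟨t1, h1⟩ := h
  obtain ⟨t2, h2⟩ := hg
  rw [← h2] at h1
  simp at h1

theorem foldA_eq (ks : List String) (m g : String) (p : List String) :
    ks.foldl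
      (fun (st : String × String × List String) kw =>
        if PySem.Str.startswith kw "mood:" then (PySem.Str.slice kw (some 5) none, st.2.1, st.2.2)
        else if PySem.Str.startswith kw "genre:" then (st.1, PySem.Str.slice kw (some 6) none, st.2.2)
        else (st.1, st.2.1, st.2.2 ++ [kw]))
      (m, g, p)
    = ((((ks.filter (fun kw => PySem.Str.startswith kw "mood:")).map
          (fun kw => PySem.Str.slice kw (some 5) none)).getLast?).getD m,
       (((ks.filter (fun kw => PySem.Str.startswith kw "genre:")).map
          (fun kw => PySem.Str.slice kw (some 6) none)).getLast?).getD g,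
       p ++ ks.filter
          (fun kw => !(PySem.Str.startswith kw "mood:" || PySem.Str.startswith kw "genre:"))) := by
  induction ks generalizing m g p with
  | nil => simp
  | cons kw rest ih =>
    by_cases hm : PySem.Str.startswith kw "mood:" = true
    · have hg := not_both_prefixes kw hm
      simp only [List.foldl_cons, List.filter_cons, hm, hg, if_true,
        if_neg, Bool.false_eq_true, not_false_iff, List.map_cons]
      rw [ih]; simp [getLastD_cons]
    · by_cases hg : PySem.Str.startswith kw "genre:" = true
      · simp only [List.foldl_cons, List.filter_cons, hm, hg, if_true,
          if_neg, Bool.false_eq_true, not_false_iff, List.map_cons]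
        rw [ih]; simp [getLastD_cons]
      · simp only [List.foldl_cons, List.filter_cons, hm, hg, Bool.false_or,
          Bool.not_false, if_neg, Bool.false_eq_true, not_false_iff, if_pos]
        rw [ih]
        simp

-- ===== VERDICT (by name: the statement is the Claim_ definition above) =====
theorem parse_music_keywords_py_spec : Claim_equal_parse_music_keywords_py := by
  intro keywords _
  unfold Spec_parse_music_keywords_py parse_music_keywords_py parse_music_keywords_py_alt
  rw [foldA_eq]
  simp
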